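-- pv_equiv track=rewrite | github.com/ma2canada/phd-code | maketrix2020.py | maketrix_test
-- ===== SOURCE A (Python) =====
-- def maketrix_test(params,maxi):
--     trix = [[' 0' for y in range(maxi*maxi)] for x in range(maxi*maxi)]
--     for i in range(maxi):
--       for j in range(maxi):
--         for k in range(maxi):
--           for l in range(maxi):
--             if(i == j and k == l and j + 1 == maxi and l+1 == maxi):
--                 trix[maxi*i + k][maxi*j + l]='nm';
--             elif(i == j and k == l and l+1 == maxi):
--                 trix[maxi*i + k][maxi*j + l]='gn';
--             elif(i == j and k == l and j+1 == maxi):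
--                 trix[maxi*i + k][maxi*j + l]='gm';
--             elif(i == j and k == l):
--                 trix[maxi*i + k][maxi*j + l]='gg';
--             elif(i == j and k-1 == l):
--                 trix[maxi*i + k][maxi*j + l]='bn';
--             elif(i == j and k+1 == l):
--                 trix[maxi*i + k][maxi*j + l]='dn';
--             elif(i-1 == j and k+1 == l):#here's the change
--                 trix[maxi*i + k][maxi*j + l]='bm';
--             elif(i-1 == j and k == l):#here's unchanged
--                 trix[maxi*i + k][maxi*j + l]='BM';
--             elif(i+1 == j and k == l):
--                 trix[maxi*i + k][maxi*j + l]='dm';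
--     return trix
-- ===== SOURCE B (Python) =====
-- def maketrix_test(params, maxi):
--     trix = [[' 0' for y in range(maxi * maxi)] for x in range(maxi * maxi)]
--     for i in range(maxi):
--         # diagonal block j == i
--         for k in range(maxi):
--             r = maxi * i + k
--             if i + 1 == maxi and k + 1 == maxi:
--                 trix[r][r] = 'nm'
--             elif k + 1 == maxi:
--                 trix[r][r] = 'gn'
--             elif i + 1 == maxi:
--                 trix[r][r] = 'gm'
--             else:
--                 trix[r][r] = 'gg'
--             if k >= 1:
--                 trix[r][r - 1] = 'bn'
--             if k + 1 < maxi: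
--                 trix[r][r + 1] = 'dn'
--         # sub-diagonal block j == i - 1
--         if i >= 1:
--             for k in range(maxi):
--                 trix[maxi * i + k][maxi * (i - 1) + k] = 'BM'
--                 if k + 1 < maxi:
--                     trix[maxi * i + k][maxi * (i - 1) + k + 1] = 'bm'
--         # super-diagonal block j == i + 1
--         if i + 1 < maxi:
--             for k in range(maxi):
--                 trix[maxi * i + k][maxi * (i + 1) + k] = 'dm'
--     return trix
-- ===== Notes on version B (the rewrite author's own statement) =====
-- stated objective: alternative
-- what changed: Instead of scanning all maxi^4 quadruples (i,j,k,l) and testing a 9-branch cascade at each, B allocates the ' 0' grid and directly places the O(maxi^2) labels: per block row i it writes the diagonal block's corner/bn/dn entries, the sub-diagonal block's BM/bm entries and the super-diagonal block's dm entries at their computed positions (measured ~2x at n=16, but the O(maxi^4) grid allocation dominates both at large sizes).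
import Mathlib
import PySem

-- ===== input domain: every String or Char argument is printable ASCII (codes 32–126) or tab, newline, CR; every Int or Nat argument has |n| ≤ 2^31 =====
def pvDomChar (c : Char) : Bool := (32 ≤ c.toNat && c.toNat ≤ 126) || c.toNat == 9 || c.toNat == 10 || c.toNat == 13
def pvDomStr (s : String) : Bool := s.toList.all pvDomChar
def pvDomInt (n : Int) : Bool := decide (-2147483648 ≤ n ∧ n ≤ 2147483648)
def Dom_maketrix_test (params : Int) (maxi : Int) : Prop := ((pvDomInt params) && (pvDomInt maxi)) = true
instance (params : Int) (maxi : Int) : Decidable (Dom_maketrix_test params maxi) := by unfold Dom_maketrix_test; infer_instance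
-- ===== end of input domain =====

-- B replaces A's quadruple-loop cascade (a test at each of the maxi^4 cells) by direct
-- placement of the O(maxi^2) labels into the freshly allocated ' 0' grid (objective:
-- alternative; allocation of the maxi^2 x maxi^2 grid dominates both at large sizes).

-- ===== PORT A =====

-- Python 'trix[r][c] = v' (row fetch + element assignment); indices reached are always in range.
def pvSet2 (g : List (List String)) (r c : Int) (v : String) : List (List String) :=
  PySem.List.pySetD g r (PySem.List.pySetD (PySem.List.pyGetD g r []) c v)

-- innermost 'for l in range(maxi)' with A's 9-branch cascade
def maketrixA_l (m i j k : Int) (g : List (List String)) : List (List String) :=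
  (PySem.List.pyRange 0 m 1).foldl (fun g l =>
    if i = j ∧ k = l ∧ j + 1 = m ∧ l + 1 = m then pvSet2 g (m*i+k) (m*j+l) "nm"
    else if i = j ∧ k = l ∧ l + 1 = m then pvSet2 g (m*i+k) (m*j+l) "gn"
    else if i = j ∧ k = l ∧ j + 1 = m then pvSet2 g (m*i+k) (m*j+l) "gm"
    else if i = j ∧ k = l then pvSet2 g (m*i+k) (m*j+l) "gg"
    else if i = j ∧ k - 1 = l then pvSet2 g (m*i+k) (m*j+l) "bn"
    else if i = j ∧ k + 1 = l then pvSet2 g (m*i+k) (m*j+l) "dn"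
    else if i - 1 = j ∧ k + 1 = l then pvSet2 g (m*i+k) (m*j+l) "bm"
    else if i - 1 = j ∧ k = l then pvSet2 g (m*i+k) (m*j+l) "BM"
    else if i + 1 = j ∧ k = l then pvSet2 g (m*i+k) (m*j+l) "dm"
    else g) g

def maketrixA_k (m i j : Int) (g : List (List String)) : List (List String) :=
  (PySem.List.pyRange 0 m 1).foldl (fun g k => maketrixA_l m i j k g) g

def maketrixA_j (m i : Int) (g : List (List String)) : List (List String) :=
  (PySem.List.pyRange 0 m 1).foldl (fun g j => maketrixA_k m i j g) g

def maketrix_test (params : Int) (maxi : Int) : List (List String) :=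
  let trix := (PySem.List.pyRange 0 (maxi*maxi) 1).map
    (fun _ => (PySem.List.pyRange 0 (maxi*maxi) 1).map (fun _ => " 0"))
  (PySem.List.pyRange 0 maxi 1).foldl (fun g i => maketrixA_j maxi i g) trix

-- ===== PORT B =====

-- diagonal block j = i: corner labels on the diagonal, 'bn' left, 'dn' right
def maketrixB_diag (m i : Int) (g : List (List String)) : List (List String) :=
  (PySem.List.pyRange 0 m 1).foldl (fun g k =>
    let r := m*i + k
    let g := if i + 1 = m ∧ k + 1 = m then pvSet2 g r r "nm"
             else if k + 1 = m then pvSet2 g r r "gn"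
             else if i + 1 = m then pvSet2 g r r "gm"
             else pvSet2 g r r "gg"
    let g := if 1 ≤ k then pvSet2 g r (r-1) "bn" else g
    if k + 1 < m then pvSet2 g r (r+1) "dn" else g) g

-- sub-diagonal block j = i-1: 'BM' on k = l, 'bm' on k+1 = l
def maketrixB_sub (m i : Int) (g : List (List String)) : List (List String) :=
  (PySem.List.pyRange 0 m 1).foldl (fun g k =>
    let g := pvSet2 g (m*i+k) (m*(i-1)+k) "BM"
    if k + 1 < m then pvSet2 g (m*i+k) (m*(i-1)+k+1) "bm" else g) g

-- super-diagonal block j = i+1: 'dm' on k = l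
def maketrixB_sup (m i : Int) (g : List (List String)) : List (List String) :=
  (PySem.List.pyRange 0 m 1).foldl (fun g k => pvSet2 g (m*i+k) (m*(i+1)+k) "dm") g

def maketrix_test_alt (params : Int) (maxi : Int) : List (List String) :=
  let trix := (PySem.List.pyRange 0 (maxi*maxi) 1).map
    (fun _ => (PySem.List.pyRange 0 (maxi*maxi) 1).map (fun _ => " 0"))
  (PySem.List.pyRange 0 maxi 1).foldl (fun g i =>
    let g := maketrixB_diag maxi i g
    let g := if 1 ≤ i then maketrixB_sub maxi i g else g
    if i + 1 < maxi then maketrixB_sup maxi i g else g) trix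

-- ===== PRECONDITION & SPEC =====
def Spec_maketrix_test (params : Int) (maxi : Int) (out : List (List String)) : Prop := out = maketrix_test_alt params maxi
instance (params : Int) (maxi : Int) (out : List (List String)) : Decidable (Spec_maketrix_test params maxi out) := by unfold Spec_maketrix_test; infer_instance

-- ===== CLAIM (what is proved, stated in full; the proofs are below) =====
def Claim_equal_maketrix_test : Prop := ∀ (params : Int) (maxi : Int), Dom_maketrix_test params maxi → Spec_maketrix_test params maxi (maketrix_test params maxi)

-- ===== LEMMAS AND PROOFS =====

-- the grid seen as a function of (row, col); default is irrelevant (only used in range)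
def pvCell (g : List (List String)) (r c : Nat) : String := (g.getD r []).getD c " 0"

-- the invariant: an n × n grid
def pvDims (n : Nat) (g : List (List String)) : Prop :=
  g.length = n ∧ ∀ row ∈ g, row.length = n

-- A's cascade as a partial value: the label (if any) written at block (i,j), offset (k,l)
def pvCasc (m i j k l : Int) : Option String :=
  if i = j ∧ k = l ∧ j + 1 = m ∧ l + 1 = m then some "nm"
  else if i = j ∧ k = l ∧ l + 1 = m then some "gn"
  else if i = j ∧ k = l ∧ j + 1 = m then some "gm"
  else if i = j ∧ k = l then some "gg"
  else if i = j ∧ k - 1 = l then some "bn"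
  else if i = j ∧ k + 1 = l then some "dn"
  else if i - 1 = j ∧ k + 1 = l then some "bm"
  else if i - 1 = j ∧ k = l then some "BM"
  else if i + 1 = j ∧ k = l then some "dm"
  else none

theorem pvSet2_dims {n : Nat} {g : List (List String)} (hg : pvDims n g)
    {r : Int} (hr : 0 ≤ r) (hrn : r < (n : Int)) (c : Int) (v : String) :
    pvDims n (pvSet2 g r c v) := by
  obtain ⟨hlen, hrows⟩ := hg
  have hrt : r.toNat < g.length := by omega
  have hrow : PySem.List.pyGetD g r [] = g[r.toNat] :=
    by rw [PySem.List.pyGetD_eq_getElem] <;> omega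
  refine ⟨?_, ?_⟩
  · rw [pvSet2, PySem.List.pySetD_of_nonneg _ _ hr, List.length_set]; exact hlen
  · intro row hmem
    rw [pvSet2, PySem.List.pySetD_of_nonneg _ _ hr] at hmem
    rcases List.mem_or_eq_of_mem_set hmem with h | h
    · exact hrows _ h
    · subst h
      rw [PySem.List.length_pySetD, hrow]
      exact hrows _ (List.getElem_mem hrt)

theorem pvCell_pvSet2 {n : Nat} {g : List (List String)} (hg : pvDims n g)
    {r c : Nat} {r' c' : Int} (hr' : 0 ≤ r') (hc' : 0 ≤ c') (hrn : r' < (n : Int)) (hcn : c' < (n : Int))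
    (hr : r < n) (hc : c < n) (v : String) :
    pvCell (pvSet2 g r' c' v) r c = if (r : Int) = r' ∧ (c : Int) = c' then v else pvCell g r c := by
  obtain ⟨hlen, hrows⟩ := hg
  have hrt : r'.toNat < g.length := by omega
  have hrow : PySem.List.pyGetD g r' [] = g[r'.toNat] :=
    by rw [PySem.List.pyGetD_eq_getElem] <;> omega
  have hrowlen : (g[r'.toNat]).length = n := hrows _ (List.getElem_mem hrt)
  rw [pvSet2, PySem.List.pySetD_of_nonneg _ _ hr', hrow, PySem.List.pySetD_of_nonneg _ _ hc']
  unfold pvCell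
  have hgrow : g.getD r'.toNat [] = g[r'.toNat] := by
    rw [List.getD_eq_getElem?_getD, List.getElem?_eq_getElem hrt]; rfl
  by_cases h1 : r = r'.toNat
  · subst h1
    have hset : (g.set r'.toNat (g[r'.toNat].set c'.toNat v)).getD r'.toNat [] = g[r'.toNat].set c'.toNat v := by
      rw [List.getD_eq_getElem?_getD, List.getElem?_set_self (by omega : r'.toNat < g.length)]; rfl
    rw [hset, hgrow]
    by_cases h2 : c = c'.toNat
    · subst h2
      rw [List.getD_eq_getElem?_getD, List.getElem?_set_self (by omega : c'.toNat < (g[r'.toNat]).length),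
        if_pos (⟨by omega, by omega⟩ : ((r'.toNat : Nat) : Int) = r' ∧ ((c'.toNat : Nat) : Int) = c')]
      rfl
    · rw [List.getD_eq_getElem?_getD, List.getElem?_set_ne (by omega : c'.toNat ≠ c),
        if_neg (by omega), List.getD_eq_getElem?_getD]
  · have hset : (g.set r'.toNat (g[r'.toNat].set c'.toNat v)).getD r [] = g.getD r [] := by
      rw [List.getD_eq_getElem?_getD, List.getElem?_set_ne (by omega : r'.toNat ≠ r), List.getD_eq_getElem?_getD]
    rw [hset, if_neg (by omega)]

-- generic: a fold whose body touches cell (r,c) in at most the iteration t = K (when b), applying F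
theorem pvFoldl_cell {n : Nat} (body : List (List String) → Int → List (List String)) (L : List Int)
    (r c : Nat) (b : Prop) [Decidable b] (K : Int) (F : String → String)
    (hd : ∀ g t, t ∈ L → pvDims n g → pvDims n (body g t))
    (hspec : ∀ g t, t ∈ L → pvDims n g →
      pvCell (body g t) r c = if b ∧ K = t then F (pvCell g r c) else pvCell g r c)
    (hnd : L.Nodup) :
    ∀ g, pvDims n g → pvCell (L.foldl body g) r c =
      if b ∧ K ∈ L then F (pvCell g r c) else pvCell g r c := by
  revert hd hspec hnd
  induction L with
  | nil => intro _ _ _ g hg; simp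
  | cons t L ih =>
    intro hd hspec hnd g hg
    have hnd' := List.nodup_cons.mp hnd
    rw [List.foldl_cons,
      ih (fun g t' ht' => hd g t' (List.mem_cons_of_mem _ ht'))
         (fun g t' ht' => hspec g t' (List.mem_cons_of_mem _ ht')) hnd'.2
         (body g t) (hd g t (List.mem_cons_self ..) hg),
      hspec g t (List.mem_cons_self ..) hg]
    by_cases hb : b
    · simp only [List.mem_cons, hb, true_and]
      by_cases hKt : K = t
      · have hKL : K ∉ L := hKt ▸ hnd'.1
        simp [hKt, hKt ▸ hKL]
      · simp [hKt]
    · simp [hb]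

theorem pvFoldl_dims {n : Nat} (body : List (List String) → Int → List (List String)) (L : List Int)
    (hd : ∀ g t, t ∈ L → pvDims n g → pvDims n (body g t)) :
    ∀ g, pvDims n g → pvDims n (L.foldl body g) := by
  revert hd
  induction L with
  | nil => intro _ g hg; exact hg
  | cons t L ih =>
    intro hd g hg
    exact ih (fun g t' ht' => hd g t' (List.mem_cons_of_mem _ ht'))
      (body g t) (hd g t (List.mem_cons_self ..) hg)

theorem pvGrid_ext {n : Nat} {g g' : List (List String)} (hg : pvDims n g) (hg' : pvDims n g')
    (h : ∀ r c, r < n → c < n → pvCell g r c = pvCell g' r c) : g = g' := by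
  obtain ⟨hl, hrows⟩ := hg
  obtain ⟨hl', hrows'⟩ := hg'
  apply List.ext_getElem (by omega)
  intro r h1 h2
  have hrn : (g[r]).length = n := hrows _ (List.getElem_mem h1)
  have hrn' : (g'[r]).length = n := hrows' _ (List.getElem_mem h2)
  apply List.ext_getElem (by omega)
  intro c hc1 hc2
  have hcell := h r c (by omega) (by omega)
  unfold pvCell at hcell
  simp only [List.getD_eq_getElem?_getD, List.getElem?_eq_getElem h1, List.getElem?_eq_getElem h2,
    Option.getD_some, List.getElem?_eq_getElem hc1, List.getElem?_eq_getElem hc2] at hcell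
  exact hcell

-- block-decomposition arithmetic: x lies in block j iff x / m = j
theorem pvBlock_iff {m j x : Int} (hm : 0 < m) : (0 ≤ x - m*j ∧ x - m*j < m) ↔ x / m = j := by
  constructor
  · rintro ⟨h1, h2⟩
    have hx : x = (x - m*j) + m*j := by ring
    rw [hx, Int.add_mul_ediv_left _ _ (by omega : m ≠ 0), Int.ediv_eq_zero_of_lt h1 h2, zero_add]
  · intro h
    have h0 := Int.emod_nonneg x (by omega : m ≠ 0)
    have h1 := Int.emod_lt_of_pos x hm
    have h2 := Int.mul_ediv_add_emod x m
    rw [h] at h2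
    constructor <;> linarith

theorem pvDivLt {m x : Int} (hm : 0 < m) (h0 : 0 ≤ x) (hx : x < m*m) : 0 ≤ x / m ∧ x / m < m := by
  refine ⟨Int.ediv_nonneg h0 hm.le, ?_⟩
  by_contra hlt
  have hge : m ≤ x / m := by omega
  have h0' := Int.emod_nonneg x (by omega : m ≠ 0)
  nlinarith [Int.mul_ediv_add_emod x m, mul_le_mul_of_nonneg_left hge hm.le]

theorem pvIdx {m i k : Int} (hm : 0 < m) (hi : 0 ≤ i ∧ i < m) (hk : 0 ≤ k ∧ k < m) :
    0 ≤ m*i + k ∧ m*i + k < m*m := by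
  constructor
  · nlinarith [mul_nonneg hm.le hi.1]
  · nlinarith [mul_le_mul_of_nonneg_left (by omega : i + 1 ≤ m) hm.le]

-- dimension preservation for every loop helper
theorem pvAl_dims {n : Nat} {m i j k : Int} (hm : 0 < m) (hn : (n:Int) = m*m)
    (hi : 0 ≤ i ∧ i < m) (hk : 0 ≤ k ∧ k < m) :
    ∀ g, pvDims n g → pvDims n (maketrixA_l m i j k g) := by
  intro g hg
  unfold maketrixA_l
  refine pvFoldl_dims _ _ ?_ g hg
  intro g l _ hg
  have h1 := pvIdx hm hi hk
  split_ifs <;> first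
    | exact hg
    | exact pvSet2_dims hg h1.1 (by rw [hn]; exact h1.2) _ _

theorem pvAk_dims {n : Nat} {m i j : Int} (hm : 0 < m) (hn : (n:Int) = m*m)
    (hi : 0 ≤ i ∧ i < m) :
    ∀ g, pvDims n g → pvDims n (maketrixA_k m i j g) := by
  intro g hg
  unfold maketrixA_k
  refine pvFoldl_dims _ _ ?_ g hg
  intro g k hk hg
  exact pvAl_dims hm hn hi (PySem.List.mem_pyRange_one.mp hk) g hg

theorem pvAj_dims {n : Nat} {m i : Int} (hm : 0 < m) (hn : (n:Int) = m*m)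
    (hi : 0 ≤ i ∧ i < m) :
    ∀ g, pvDims n g → pvDims n (maketrixA_j m i g) := by
  intro g hg
  unfold maketrixA_j
  refine pvFoldl_dims _ _ ?_ g hg
  intro g j _ hg
  exact pvAk_dims hm hn hi g hg

theorem pvBdiag_dims {n : Nat} {m i : Int} (hm : 0 < m) (hn : (n:Int) = m*m)
    (hi : 0 ≤ i ∧ i < m) :
    ∀ g, pvDims n g → pvDims n (maketrixB_diag m i g) := by
  intro g hg
  unfold maketrixB_diag
  refine pvFoldl_dims _ _ ?_ g hg
  intro g k hk hg
  have h1 := pvIdx hm hi (PySem.List.mem_pyRange_one.mp hk)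
  have hset : ∀ (g : List (List String)) (c : Int) (v : String), pvDims n g → pvDims n (pvSet2 g (m*i+k) c v) :=
    fun g c v hg => pvSet2_dims hg h1.1 (by rw [hn]; exact h1.2) _ _
  dsimp only
  split_ifs <;> first
    | exact hset _ _ _ (hset _ _ _ (hset _ _ _ hg))
    | exact hset _ _ _ (hset _ _ _ hg)
    | exact hset _ _ _ hg

theorem pvBsub_dims {n : Nat} {m i : Int} (hm : 0 < m) (hn : (n:Int) = m*m)
    (hi : 0 ≤ i ∧ i < m) :
    ∀ g, pvDims n g → pvDims n (maketrixB_sub m i g) := by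
  intro g hg
  unfold maketrixB_sub
  refine pvFoldl_dims _ _ ?_ g hg
  intro g k hk hg
  have h1 := pvIdx hm hi (PySem.List.mem_pyRange_one.mp hk)
  have hset : ∀ (g : List (List String)) (c : Int) (v : String), pvDims n g → pvDims n (pvSet2 g (m*i+k) c v) :=
    fun g c v hg => pvSet2_dims hg h1.1 (by rw [hn]; exact h1.2) _ _
  dsimp only
  split_ifs <;> first
    | exact hset _ _ _ (hset _ _ _ hg)
    | exact hset _ _ _ hg

theorem pvBsup_dims {n : Nat} {m i : Int} (hm : 0 < m) (hn : (n:Int) = m*m)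
    (hi : 0 ≤ i ∧ i < m) :
    ∀ g, pvDims n g → pvDims n (maketrixB_sup m i g) := by
  intro g hg
  unfold maketrixB_sup
  refine pvFoldl_dims _ _ ?_ g hg
  intro g k hk hg
  have h1 := pvIdx hm hi (PySem.List.mem_pyRange_one.mp hk)
  exact pvSet2_dims hg h1.1 (by rw [hn]; exact h1.2) _ _

-- A, innermost loop: iteration l writes cell (m*i+k, m*j+l) with the cascade's label
set_option maxHeartbeats 1000000 in
theorem pvAl_spec {n : Nat} {m i j k : Int} (hm : 0 < m) (hn : (n:Int) = m*m)
    (hi : 0 ≤ i ∧ i < m) (hj : 0 ≤ j ∧ j < m) (hk : 0 ≤ k ∧ k < m)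
    (r c : Nat) (hr : r < n) (hc : c < n) :
    ∀ g, pvDims n g → pvCell (maketrixA_l m i j k g) r c =
      if ((r:Int) = m*i + k) ∧ ((c:Int) - m*j) ∈ PySem.List.pyRange 0 m 1 then
        (pvCasc m i j k ((c:Int) - m*j)).getD (pvCell g r c) else pvCell g r c := by
  intro g hg
  unfold maketrixA_l
  refine pvFoldl_cell _ _ r c ((r:Int) = m*i + k) ((c:Int) - m*j)
    (fun old => (pvCasc m i j k ((c:Int) - m*j)).getD old) ?_ ?_
    (PySem.List.nodup_pyRange_one 0 m) g hg
  · intro g l _ hg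
    have h1 := pvIdx hm hi hk
    split_ifs <;> first
      | exact hg
      | exact pvSet2_dims hg h1.1 (by rw [hn]; exact h1.2) _ _
  · intro g l hl hg
    have hlb := PySem.List.mem_pyRange_one.mp hl
    have h1 := pvIdx hm hi hk
    have h2 := pvIdx hm hj hlb
    have key : ∀ v, pvCell (pvSet2 g (m*i+k) (m*j+l) v) r c =
        if (r:Int) = m*i+k ∧ (c:Int) = m*j+l then v else pvCell g r c :=
      fun v => pvCell_pvSet2 hg h1.1 h2.1 (by rw [hn]; exact h1.2) (by rw [hn]; exact h2.2) hr hc v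
    by_cases hbK : ((r:Int) = m*i + k) ∧ ((c:Int) - m*j = l)
    · obtain ⟨hbr, hbc⟩ := hbK
      have hcc : (c:Int) = m*j + l := by linarith
      conv_rhs => rw [if_pos (⟨hbr, hbc⟩ : (r:Int) = m*i + k ∧ (c:Int) - m*j = l), hbc]
      unfold pvCasc
      split_ifs <;>
        simp only [Option.getD_some, Option.getD_none] <;>
        first
          | rfl
          | (rw [key]; exact if_pos ⟨hbr, hcc⟩)
    · rw [if_neg hbK]
      split_ifs <;> first
        | rfl
        | (rw [key]; exact if_neg (fun h => hbK ⟨h.1, by linarith [h.2]⟩))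

-- A, k loop: condition re-expressed with k recovered as r - m*i
theorem pvAk_spec {n : Nat} {m i j : Int} (hm : 0 < m) (hn : (n:Int) = m*m)
    (hi : 0 ≤ i ∧ i < m) (hj : 0 ≤ j ∧ j < m)
    (r c : Nat) (hr : r < n) (hc : c < n) :
    ∀ g, pvDims n g → pvCell (maketrixA_k m i j g) r c =
      if (0 ≤ (c:Int) - m*j ∧ (c:Int) - m*j < m) ∧ ((r:Int) - m*i) ∈ PySem.List.pyRange 0 m 1 then
        (pvCasc m i j ((r:Int) - m*i) ((c:Int) - m*j)).getD (pvCell g r c) else pvCell g r c := by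
  intro g hg
  unfold maketrixA_k
  refine pvFoldl_cell _ _ r c (0 ≤ (c:Int) - m*j ∧ (c:Int) - m*j < m) ((r:Int) - m*i)
    (fun old => (pvCasc m i j ((r:Int) - m*i) ((c:Int) - m*j)).getD old) ?_ ?_
    (PySem.List.nodup_pyRange_one 0 m) g hg
  · intro g k hk hg
    exact pvAl_dims hm hn hi (PySem.List.mem_pyRange_one.mp hk) g hg
  · intro g k hk hg
    have hkb := PySem.List.mem_pyRange_one.mp hk
    rw [pvAl_spec hm hn hi hj hkb r c hr hc g hg]
    by_cases hK : (r:Int) - m*i = k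
    · subst hK
      refine if_congr ?_ rfl rfl
      rw [PySem.List.mem_pyRange_one]
      exact ⟨fun ⟨_, b⟩ => ⟨b, rfl⟩, fun ⟨a, _⟩ => ⟨by ring, a⟩⟩
    · rw [if_neg (fun h => hK (by linarith [h.1])), if_neg (fun h => hK h.2)]

-- A, j loop: condition re-expressed with j recovered as c / m
theorem pvAj_spec {n : Nat} {m i : Int} (hm : 0 < m) (hn : (n:Int) = m*m)
    (hi : 0 ≤ i ∧ i < m)
    (r c : Nat) (hr : r < n) (hc : c < n) :
    ∀ g, pvDims n g → pvCell (maketrixA_j m i g) r c =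
      if (r:Int) / m = i then
        (pvCasc m i ((c:Int) / m) ((r:Int) - m*i) ((c:Int) - m*((c:Int)/m))).getD (pvCell g r c) else pvCell g r c := by
  intro g hg
  unfold maketrixA_j
  have hfold : pvCell ((PySem.List.pyRange 0 m 1).foldl (fun g j => maketrixA_k m i j g) g) r c =
      if (0 ≤ (r:Int) - m*i ∧ (r:Int) - m*i < m) ∧ ((c:Int) / m) ∈ PySem.List.pyRange 0 m 1 then
        (pvCasc m i ((c:Int) / m) ((r:Int) - m*i) ((c:Int) - m*((c:Int)/m))).getD (pvCell g r c) else pvCell g r c := by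
    refine pvFoldl_cell _ _ r c (0 ≤ (r:Int) - m*i ∧ (r:Int) - m*i < m) ((c:Int) / m)
      (fun old => (pvCasc m i ((c:Int) / m) ((r:Int) - m*i) ((c:Int) - m*((c:Int)/m))).getD old) ?_ ?_
      (PySem.List.nodup_pyRange_one 0 m) g hg
    · intro g j _ hg
      exact pvAk_dims hm hn hi g hg
    · intro g j hj hg
      have hjb := PySem.List.mem_pyRange_one.mp hj
      rw [pvAk_spec hm hn hi hjb r c hr hc g hg]
      by_cases hK : (c:Int) / m = j
      · subst hK
        refine if_congr ?_ rfl rfl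
        constructor
        · rintro ⟨_, hmem⟩
          exact ⟨PySem.List.mem_pyRange_one.mp hmem, rfl⟩
        · rintro ⟨hrb, _⟩
          exact ⟨(pvBlock_iff hm).mpr rfl, PySem.List.mem_pyRange_one.mpr hrb⟩
      · rw [if_neg (fun h => hK ((pvBlock_iff hm).mp h.1)), if_neg (fun h => hK h.2)]
  rw [hfold]
  have hdiv := pvDivLt hm (by positivity : (0:Int) ≤ (c:Int)) (by rw [← hn]; exact_mod_cast hc)
  by_cases hri : (r:Int) / m = i
  · have hb := (pvBlock_iff hm).mpr hri
    rw [if_pos ⟨hb, PySem.List.mem_pyRange_one.mpr hdiv⟩, if_pos hri]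
  · rw [if_neg (fun h => hri ((pvBlock_iff hm).mp h.1)), if_neg hri]

-- the value B's diagonal-block pass leaves on the main diagonal
def pvDiagCorner (m i k : Int) : String :=
  if i + 1 = m ∧ k + 1 = m then "nm"
  else if k + 1 = m then "gn"
  else if i + 1 = m then "gm"
  else "gg"

-- the value B's diagonal-block pass leaves at (r, c)
def pvDiagVal (m i : Int) (r c : Nat) : String :=
  if (c:Int) = (r:Int) then pvDiagCorner m i ((r:Int) - m*i)
  else if (c:Int) = (r:Int) - 1 then "bn" else "dn"

-- a guarded write leaves every other cell unchanged
theorem pvCell_condWrite {n : Nat} {g : List (List String)} (hg : pvDims n g)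
    (P : Prop) [Decidable P] {r' c' : Int}
    (hb : P → 0 ≤ r' ∧ r' < (n:Int) ∧ 0 ≤ c' ∧ c' < (n:Int))
    {r c : Nat} (hr : r < n) (hc : c < n) (v : String) :
    pvCell (if P then pvSet2 g r' c' v else g) r c =
      if P ∧ (r:Int) = r' ∧ (c:Int) = c' then v else pvCell g r c := by
  split_ifs with hP h2 h3
  · obtain ⟨b1, b2, b3, b4⟩ := hb hP
    rw [pvCell_pvSet2 hg b1 b3 b2 b4 hr hc, if_pos ⟨h2.2.1, h2.2.2⟩]
  · obtain ⟨b1, b2, b3, b4⟩ := hb hP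
    rw [pvCell_pvSet2 hg b1 b3 b2 b4 hr hc, if_neg (fun h => h2 ⟨hP, h⟩)]
  · exact absurd h3.1 hP
  · rfl

theorem pvCondWrite_dims {n : Nat} {g : List (List String)} (hg : pvDims n g)
    (P : Prop) [Decidable P] {r' : Int} (c' : Int)
    (hb : P → 0 ≤ r' ∧ r' < (n:Int)) (v : String) :
    pvDims n (if P then pvSet2 g r' c' v else g) := by
  split_ifs with hP
  · exact pvSet2_dims hg (hb hP).1 (hb hP).2 _ _
  · exact hg

-- the 4-way corner write of B's diagonal pass
theorem pvCornerWrite {n : Nat} {m i k : Int} {g : List (List String)} (hg : pvDims n g)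
    (h0 : 0 ≤ m*i+k) (h1 : m*i+k < (n:Int))
    {r c : Nat} (hr : r < n) (hc : c < n) :
    pvCell (if i + 1 = m ∧ k + 1 = m then pvSet2 g (m*i+k) (m*i+k) "nm"
      else if k + 1 = m then pvSet2 g (m*i+k) (m*i+k) "gn"
      else if i + 1 = m then pvSet2 g (m*i+k) (m*i+k) "gm"
      else pvSet2 g (m*i+k) (m*i+k) "gg") r c =
      if (r:Int) = m*i+k ∧ (c:Int) = m*i+k then pvDiagCorner m i k else pvCell g r c := by
  unfold pvDiagCorner
  by_cases hA : i + 1 = m ∧ k + 1 = m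
  · rw [if_pos hA, if_pos hA, pvCell_pvSet2 hg h0 h0 h1 h1 hr hc]
  · rw [if_neg hA, if_neg hA]
    by_cases hB : k + 1 = m
    · rw [if_pos hB, if_pos hB, pvCell_pvSet2 hg h0 h0 h1 h1 hr hc]
    · rw [if_neg hB, if_neg hB]
      by_cases hC : i + 1 = m
      · rw [if_pos hC, if_pos hC, pvCell_pvSet2 hg h0 h0 h1 h1 hr hc]
      · rw [if_neg hC, if_neg hC, pvCell_pvSet2 hg h0 h0 h1 h1 hr hc]

theorem pvCornerWrite_dims {n : Nat} {m i k : Int} {g : List (List String)} (hg : pvDims n g)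
    (h0 : 0 ≤ m*i+k) (h1 : m*i+k < (n:Int)) :
    pvDims n (if i + 1 = m ∧ k + 1 = m then pvSet2 g (m*i+k) (m*i+k) "nm"
      else if k + 1 = m then pvSet2 g (m*i+k) (m*i+k) "gn"
      else if i + 1 = m then pvSet2 g (m*i+k) (m*i+k) "gm"
      else pvSet2 g (m*i+k) (m*i+k) "gg") := by
  split_ifs <;> exact pvSet2_dims hg h0 h1 _ _

-- B, diagonal pass: touches (r, c) iff c ∈ {r-1, r, r+1} within block (i,i)
set_option maxHeartbeats 1000000 in
theorem pvBdiag_spec {n : Nat} {m i : Int} (hm : 0 < m) (hn : (n:Int) = m*m)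
    (hi : 0 ≤ i ∧ i < m)
    (r c : Nat) (hr : r < n) (hc : c < n) :
    ∀ g, pvDims n g → pvCell (maketrixB_diag m i g) r c =
      if ((c:Int) = (r:Int) ∨ ((c:Int) = (r:Int) - 1 ∧ m*i + 1 ≤ (r:Int)) ∨
            ((c:Int) = (r:Int) + 1 ∧ (r:Int) + 1 < m*i + m)) ∧
          ((r:Int) - m*i) ∈ PySem.List.pyRange 0 m 1 then
        pvDiagVal m i r c else pvCell g r c := by
  intro g hg
  unfold maketrixB_diag
  refine pvFoldl_cell _ _ r c _ ((r:Int) - m*i) (fun _ => pvDiagVal m i r c) ?_ ?_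
    (PySem.List.nodup_pyRange_one 0 m) g hg
  · intro g k hk hg
    have h1 := pvIdx hm hi (PySem.List.mem_pyRange_one.mp hk)
    have h1' : m*i+k < (n:Int) := by rw [hn]; exact h1.2
    dsimp only
    exact pvCondWrite_dims (pvCondWrite_dims (pvCornerWrite_dims hg h1.1 h1') _ _
      (fun _ => ⟨h1.1, h1'⟩) _) _ _ (fun _ => ⟨h1.1, h1'⟩) _
  · intro g k hk hg
    have hkb := PySem.List.mem_pyRange_one.mp hk
    have h1 := pvIdx hm hi hkb
    have h1' : m*i+k < (n:Int) := by rw [hn]; exact h1.2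
    have hmi : 0 ≤ m*i := mul_nonneg hm.le hi.1
    have hub : m*i + m ≤ m*m := by
      nlinarith [mul_le_mul_of_nonneg_left (show i+1 ≤ m by omega) hm.le]
    have hgc : pvDims n (if i + 1 = m ∧ k + 1 = m then pvSet2 g (m*i+k) (m*i+k) "nm"
      else if k + 1 = m then pvSet2 g (m*i+k) (m*i+k) "gn"
      else if i + 1 = m then pvSet2 g (m*i+k) (m*i+k) "gm"
      else pvSet2 g (m*i+k) (m*i+k) "gg") := pvCornerWrite_dims hg h1.1 h1'
    have hgb := pvCondWrite_dims hgc (1 ≤ k) (m*i+k-1) (fun _ => ⟨h1.1, h1'⟩) "bn"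
    dsimp only
    rw [pvCell_condWrite hgb (k + 1 < m) (fun hk1 => ⟨h1.1, h1', by omega, by omega⟩) hr hc "dn",
      pvCell_condWrite hgc (1 ≤ k) (fun hk1 => ⟨h1.1, h1', by omega, by omega⟩) hr hc "bn",
      pvCornerWrite hg h1.1 h1' hr hc]
    by_cases hrow : (r:Int) = m*i + k
    · by_cases hdn : k + 1 < m ∧ (c:Int) = m*i+k+1
      · rw [if_pos ⟨hdn.1, hrow, hdn.2⟩,
          if_pos ⟨Or.inr (Or.inr ⟨by omega, by omega⟩), by omega⟩]
        unfold pvDiagVal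
        rw [if_neg (by omega), if_neg (by omega)]
      · rw [if_neg (fun h => hdn ⟨h.1, h.2.2⟩)]
        by_cases hbn : 1 ≤ k ∧ (c:Int) = m*i+k-1
        · rw [if_pos ⟨hbn.1, hrow, hbn.2⟩,
            if_pos ⟨Or.inr (Or.inl ⟨by omega, by omega⟩), by omega⟩]
          unfold pvDiagVal
          rw [if_neg (by omega), if_pos (by omega)]
        · rw [if_neg (fun h => hbn ⟨h.1, h.2.2⟩)]
          by_cases hcr : (c:Int) = m*i+k
          · rw [if_pos ⟨hrow, hcr⟩, if_pos ⟨Or.inl (by omega), by omega⟩]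
            unfold pvDiagVal
            rw [if_pos (by omega : (c:Int) = (r:Int))]
            have hk' : (r:Int) - m*i = k := by omega
            rw [hk']
          · rw [if_neg (fun h => hcr h.2), if_neg ?_]
            rintro ⟨hb, hK⟩
            rcases hb with h | h | h
            · exact hcr (by omega)
            · exact hbn ⟨by omega, by omega⟩
            · exact hdn ⟨by omega, by omega⟩
    · rw [if_neg (fun h => hrow h.2.1), if_neg (fun h => hrow h.2.1),
        if_neg (fun h => hrow h.1),
        if_neg (fun h => hrow (by have := h.2; omega))]

-- B, sub-diagonal pass (only run when 1 ≤ i): touches (r, c) iff c ∈ {r-m, r-m+1} in block (i, i-1)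
theorem pvBsub_spec {n : Nat} {m i : Int} (hm : 0 < m) (hn : (n:Int) = m*m)
    (hi : 0 ≤ i ∧ i < m) (hi1 : 1 ≤ i)
    (r c : Nat) (hr : r < n) (hc : c < n) :
    ∀ g, pvDims n g → pvCell (maketrixB_sub m i g) r c =
      if ((c:Int) = (r:Int) - m ∨ ((c:Int) = (r:Int) - m + 1 ∧ (r:Int) + 1 < m*i + m)) ∧
          ((r:Int) - m*i) ∈ PySem.List.pyRange 0 m 1 then
        (if (c:Int) = (r:Int) - m then "BM" else "bm") else pvCell g r c := by
  intro g hg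
  unfold maketrixB_sub
  refine pvFoldl_cell _ _ r c _ ((r:Int) - m*i)
    (fun _ => if (c:Int) = (r:Int) - m then "BM" else "bm") ?_ ?_
    (PySem.List.nodup_pyRange_one 0 m) g hg
  · intro g k hk hg
    have hkb := PySem.List.mem_pyRange_one.mp hk
    have h1 := pvIdx hm hi hkb
    have h1' : m*i+k < (n:Int) := by rw [hn]; exact h1.2
    dsimp only
    exact pvCondWrite_dims (pvSet2_dims hg h1.1 h1' _ _) _ _ (fun _ => ⟨h1.1, h1'⟩) _
  · intro g k hk hg
    have hkb := PySem.List.mem_pyRange_one.mp hk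
    have h1 := pvIdx hm hi hkb
    have h1' : m*i+k < (n:Int) := by rw [hn]; exact h1.2
    have h2 := pvIdx (i := i-1) hm ⟨by omega, by omega⟩ hkb
    have h2' : m*(i-1)+k < (n:Int) := by rw [hn]; exact h2.2
    have hgm : pvDims n (pvSet2 g (m*i+k) (m*(i-1)+k) "BM") := pvSet2_dims hg h1.1 h1' _ _
    dsimp only
    rw [pvCell_condWrite hgm (k + 1 < m) (c' := m*(i-1)+k+1) (fun hk1 => by
        have h3 := pvIdx hm (⟨by omega, by omega⟩ : 0 ≤ i-1 ∧ i-1 < m) (⟨by omega, hk1⟩ : 0 ≤ k+1 ∧ k+1 < m)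
        exact ⟨h1.1, h1', by omega, by rw [hn]; omega⟩) hr hc "bm",
      pvCell_pvSet2 hg h1.1 h2.1 h1' h2' hr hc]
    have hms : m*(i-1) = m*i - m := by ring
    by_cases hrow : (r:Int) = m*i + k
    · by_cases hbm : k + 1 < m ∧ (c:Int) = m*(i-1)+k+1
      · rw [if_pos ⟨hbm.1, hrow, hbm.2⟩,
          if_pos ⟨Or.inr ⟨by omega, by omega⟩, by omega⟩, if_neg (by omega)]
      · rw [if_neg (fun h => hbm ⟨h.1, h.2.2⟩)]
        by_cases hBM : (c:Int) = m*(i-1)+k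
        · rw [if_pos ⟨hrow, hBM⟩, if_pos ⟨Or.inl (by omega), by omega⟩, if_pos (by omega)]
        · rw [if_neg (fun h => hBM h.2), if_neg ?_]
          rintro ⟨hb, hK⟩
          rcases hb with h | h
          · exact hBM (by omega)
          · exact hbm ⟨by omega, by omega⟩
    · rw [if_neg (fun h => hrow h.2.1), if_neg (fun h => hrow h.1),
        if_neg (fun h => hrow (by have := h.2; omega))]

-- B, super-diagonal pass (only run when i + 1 < m): touches (r, c) iff c = r + m in block (i, i+1)
theorem pvBsup_spec {n : Nat} {m i : Int} (hm : 0 < m) (hn : (n:Int) = m*m)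
    (hi : 0 ≤ i ∧ i < m) (hi1 : i + 1 < m)
    (r c : Nat) (hr : r < n) (hc : c < n) :
    ∀ g, pvDims n g → pvCell (maketrixB_sup m i g) r c =
      if (c:Int) = (r:Int) + m ∧ ((r:Int) - m*i) ∈ PySem.List.pyRange 0 m 1 then
        "dm" else pvCell g r c := by
  intro g hg
  unfold maketrixB_sup
  refine pvFoldl_cell _ _ r c _ ((r:Int) - m*i) (fun _ => "dm") ?_ ?_
    (PySem.List.nodup_pyRange_one 0 m) g hg
  · intro g k hk hg
    have hkb := PySem.List.mem_pyRange_one.mp hk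
    have h1 := pvIdx hm hi hkb
    have h1' : m*i+k < (n:Int) := by rw [hn]; exact h1.2
    exact pvSet2_dims hg h1.1 h1' _ _
  · intro g k hk hg
    have hkb := PySem.List.mem_pyRange_one.mp hk
    have h1 := pvIdx hm hi hkb
    have h1' : m*i+k < (n:Int) := by rw [hn]; exact h1.2
    have h2 := pvIdx (i := i+1) hm ⟨by omega, hi1⟩ hkb
    have h2' : m*(i+1)+k < (n:Int) := by rw [hn]; exact h2.2
    rw [pvCell_pvSet2 hg h1.1 h2.1 h1' h2' hr hc]
    have hms : m*(i+1) = m*i + m := by ring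
    by_cases hrow : (r:Int) = m*i + k
    · by_cases hd : (c:Int) = m*(i+1)+k
      · rw [if_pos ⟨hrow, hd⟩, if_pos ⟨by omega, by omega⟩]
      · rw [if_neg (fun h => hd h.2), if_neg (fun h => hd (by have := h.1; omega))]
    · rw [if_neg (fun h => hrow h.1), if_neg (fun h => hrow (by have := h.2; omega))]

-- pointwise evaluation of the cascade in each block
theorem pvCasc_diag {m i k l : Int} (h : k = l) : pvCasc m i i k l = some (pvDiagCorner m i k) := by
  unfold pvCasc pvDiagCorner
  split_ifs <;> first | rfl | omega

theorem pvCasc_bn {m i k l : Int} (h : k - 1 = l) : pvCasc m i i k l = some "bn" := by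
  unfold pvCasc
  split_ifs <;> first | rfl | omega

theorem pvCasc_dn {m i k l : Int} (h : k + 1 = l) : pvCasc m i i k l = some "dn" := by
  unfold pvCasc
  split_ifs <;> first | rfl | omega

theorem pvCasc_diag_none {m i k l : Int} (h1 : ¬ k = l) (h2 : ¬ k - 1 = l) (h3 : ¬ k + 1 = l) :
    pvCasc m i i k l = none := by
  unfold pvCasc
  split_ifs <;> first | rfl | omega

theorem pvCasc_BM {m i k l : Int} (h : k = l) : pvCasc m i (i-1) k l = some "BM" := by
  unfold pvCasc
  split_ifs <;> first | rfl | omega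

theorem pvCasc_bm {m i k l : Int} (h : k + 1 = l) : pvCasc m i (i-1) k l = some "bm" := by
  unfold pvCasc
  split_ifs <;> first | rfl | omega

theorem pvCasc_sub_none {m i k l : Int} (h1 : ¬ k = l) (h2 : ¬ k + 1 = l) :
    pvCasc m i (i-1) k l = none := by
  unfold pvCasc
  split_ifs <;> first | rfl | omega

theorem pvCasc_dm {m i k l : Int} (h : k = l) : pvCasc m i (i+1) k l = some "dm" := by
  unfold pvCasc
  split_ifs <;> first | rfl | omega

theorem pvCasc_sup_none {m i k l : Int} (h : ¬ k = l) : pvCasc m i (i+1) k l = none := by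
  unfold pvCasc
  split_ifs <;> first | rfl | omega

theorem pvCasc_far_none {m i j k l : Int} (h0 : ¬ i = j) (h1 : ¬ i - 1 = j) (h2 : ¬ i + 1 = j) :
    pvCasc m i j k l = none := by
  unfold pvCasc
  split_ifs <;> first | rfl | omega

-- B's per-block-row body produces exactly A's cascade values
set_option maxHeartbeats 2000000 in
theorem pvBodyB_spec {n : Nat} {m i : Int} (hm : 0 < m) (hn : (n:Int) = m*m)
    (hi : 0 ≤ i ∧ i < m)
    (r c : Nat) (hr : r < n) (hc : c < n) :
    ∀ g, pvDims n g →
      pvCell (if i + 1 < m then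
                maketrixB_sup m i (if 1 ≤ i then maketrixB_sub m i (maketrixB_diag m i g) else maketrixB_diag m i g)
              else (if 1 ≤ i then maketrixB_sub m i (maketrixB_diag m i g) else maketrixB_diag m i g)) r c =
      if (r:Int) / m = i then
        (pvCasc m i ((c:Int) / m) ((r:Int) - m*i) ((c:Int) - m*((c:Int)/m))).getD (pvCell g r c) else pvCell g r c := by
  intro g hg
  have hgd : pvDims n (maketrixB_diag m i g) := pvBdiag_dims hm hn hi g hg
  have hgs : pvDims n (if 1 ≤ i then maketrixB_sub m i (maketrixB_diag m i g) else maketrixB_diag m i g) := by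
    split_ifs
    · exact pvBsub_dims hm hn hi _ hgd
    · exact hgd
  have hc0 : (0:Int) ≤ (c:Int) := by positivity
  have hcn' : (c:Int) < m*m := by rw [← hn]; exact_mod_cast hc
  have hr0 : (0:Int) ≤ (r:Int) := by positivity
  have hrn' : (r:Int) < m*m := by rw [← hn]; exact_mod_cast hr
  have hjj := pvDivLt hm hc0 hcn'
  have hccB : 0 ≤ (c:Int) - m*((c:Int)/m) ∧ (c:Int) - m*((c:Int)/m) < m := (pvBlock_iff hm).mpr rfl
  have hsub1 : m*(i-1) = m*i - m := by ring
  have hsup1 : m*(i+1) = m*i + m := by ring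
  by_cases hri : (r:Int) / m = i
  · have hrb := (pvBlock_iff hm).mpr hri
    have hmem : ((r:Int) - m*i) ∈ PySem.List.pyRange 0 m 1 := PySem.List.mem_pyRange_one.mpr hrb
    rw [if_pos hri]
    by_cases hj0 : (c:Int) / m = i
    · -- diagonal block
      have hmjj : m*((c:Int)/m) = m*i := by rw [hj0]
      rw [hmjj] at hccB ⊢
      have Esup : pvCell (if i + 1 < m then
          maketrixB_sup m i (if 1 ≤ i then maketrixB_sub m i (maketrixB_diag m i g) else maketrixB_diag m i g)
          else (if 1 ≤ i then maketrixB_sub m i (maketrixB_diag m i g) else maketrixB_diag m i g)) r c =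
          pvCell (if 1 ≤ i then maketrixB_sub m i (maketrixB_diag m i g) else maketrixB_diag m i g) r c := by
        by_cases h : i + 1 < m
        · rw [if_pos h, pvBsup_spec hm hn hi h r c hr hc _ hgs]
          exact if_neg (fun hh => by have := hh.1; omega)
        · rw [if_neg h]
      have Esub : pvCell (if 1 ≤ i then maketrixB_sub m i (maketrixB_diag m i g) else maketrixB_diag m i g) r c =
          pvCell (maketrixB_diag m i g) r c := by
        split_ifs with h
        · rw [pvBsub_spec hm hn hi h r c hr hc _ hgd]
          refine if_neg (fun hh => ?_)
          rcases hh.1 with h' | h' <;> omega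
        · rfl
      rw [Esup, Esub, pvBdiag_spec hm hn hi r c hr hc g hg]
      rw [hj0]
      by_cases h1 : (c:Int) = (r:Int)
      · rw [if_pos ⟨Or.inl h1, hmem⟩, pvCasc_diag (by omega), Option.getD_some]
        unfold pvDiagVal
        rw [if_pos h1]
      · by_cases h2 : (c:Int) = (r:Int) - 1 ∧ m*i + 1 ≤ (r:Int)
        · rw [if_pos ⟨Or.inr (Or.inl h2), hmem⟩, pvCasc_bn (by omega), Option.getD_some]
          unfold pvDiagVal
          rw [if_neg h1, if_pos h2.1]
        · by_cases h3 : (c:Int) = (r:Int) + 1 ∧ (r:Int) + 1 < m*i + m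
          · rw [if_pos ⟨Or.inr (Or.inr h3), hmem⟩, pvCasc_dn (by omega), Option.getD_some]
            unfold pvDiagVal
            rw [if_neg h1, if_neg (by omega)]
          · rw [if_neg (fun hh => by rcases hh.1 with h' | h' | h' <;> [exact h1 h'; exact h2 h'; exact h3 h']),
              pvCasc_diag_none (by omega) (by omega) (by omega), Option.getD_none]
    · by_cases hj1 : (c:Int) / m = i - 1
      · -- sub-diagonal block
        have hi1 : 1 ≤ i := by omega
        have hmjj : m*((c:Int)/m) = m*i - m := by rw [hj1]; ring
        rw [hmjj] at hccB ⊢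
        have Esup : pvCell (if i + 1 < m then
            maketrixB_sup m i (if 1 ≤ i then maketrixB_sub m i (maketrixB_diag m i g) else maketrixB_diag m i g)
            else (if 1 ≤ i then maketrixB_sub m i (maketrixB_diag m i g) else maketrixB_diag m i g)) r c =
            pvCell (if 1 ≤ i then maketrixB_sub m i (maketrixB_diag m i g) else maketrixB_diag m i g) r c := by
          by_cases h : i + 1 < m
          · rw [if_pos h, pvBsup_spec hm hn hi h r c hr hc _ hgs]
            exact if_neg (fun hh => by have := hh.1; omega)
          · rw [if_neg h]
        have Ediag : pvCell (maketrixB_diag m i g) r c = pvCell g r c := by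
          rw [pvBdiag_spec hm hn hi r c hr hc g hg]
          refine if_neg (fun hh => ?_)
          rcases hh.1 with h' | h' | h' <;> omega
        rw [Esup, if_pos hi1, pvBsub_spec hm hn hi hi1 r c hr hc _ hgd, Ediag]
        rw [hj1]
        by_cases h1 : (c:Int) = (r:Int) - m
        · rw [if_pos ⟨Or.inl h1, hmem⟩, if_pos h1, pvCasc_BM (by omega), Option.getD_some]
        · by_cases h2 : (c:Int) = (r:Int) - m + 1 ∧ (r:Int) + 1 < m*i + m
          · rw [if_pos ⟨Or.inr h2, hmem⟩, if_neg h1, pvCasc_bm (by omega), Option.getD_some]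
          · rw [if_neg (fun hh => by rcases hh.1 with h' | h' <;> [exact h1 h'; exact h2 h']),
              pvCasc_sub_none (by omega) (by omega), Option.getD_none]
      · by_cases hj2 : (c:Int) / m = i + 1
        · -- super-diagonal block
          have hi2 : i + 1 < m := by omega
          have hmjj : m*((c:Int)/m) = m*i + m := by rw [hj2]; ring
          rw [hmjj] at hccB ⊢
          have Ediag : pvCell (maketrixB_diag m i g) r c = pvCell g r c := by
            rw [pvBdiag_spec hm hn hi r c hr hc g hg]
            refine if_neg (fun hh => ?_)
            rcases hh.1 with h' | h' | h' <;> omega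
          have Esub : pvCell (if 1 ≤ i then maketrixB_sub m i (maketrixB_diag m i g) else maketrixB_diag m i g) r c =
              pvCell g r c := by
            split_ifs with h
            · rw [pvBsub_spec hm hn hi h r c hr hc _ hgd, Ediag]
              refine if_neg (fun hh => ?_)
              rcases hh.1 with h' | h' <;> omega
            · exact Ediag
          rw [if_pos hi2, pvBsup_spec hm hn hi hi2 r c hr hc _ hgs, Esub]
          rw [hj2]
          by_cases h1 : (c:Int) = (r:Int) + m
          · rw [if_pos ⟨h1, hmem⟩, pvCasc_dm (by omega), Option.getD_some]
          · rw [if_neg (fun hh => h1 hh.1), pvCasc_sup_none (by omega), Option.getD_none]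
        · -- far block: nothing written, cascade empty
          have Ediag : pvCell (maketrixB_diag m i g) r c = pvCell g r c := by
            rw [pvBdiag_spec hm hn hi r c hr hc g hg]
            refine if_neg (fun hh => ?_)
            rcases hh.1 with h' | h' | h' <;>
              exact hj0 ((pvBlock_iff hm).mp ⟨by omega, by omega⟩)
          have Esub : pvCell (if 1 ≤ i then maketrixB_sub m i (maketrixB_diag m i g) else maketrixB_diag m i g) r c =
              pvCell g r c := by
            split_ifs with h
            · rw [pvBsub_spec hm hn hi h r c hr hc _ hgd, Ediag]
              refine if_neg (fun hh => ?_)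
              rcases hh.1 with h' | h' <;>
                exact hj1 ((pvBlock_iff hm).mp ⟨by omega, by omega⟩)
            · exact Ediag
          have Esup : pvCell (if i + 1 < m then
              maketrixB_sup m i (if 1 ≤ i then maketrixB_sub m i (maketrixB_diag m i g) else maketrixB_diag m i g)
              else (if 1 ≤ i then maketrixB_sub m i (maketrixB_diag m i g) else maketrixB_diag m i g)) r c =
              pvCell g r c := by
            by_cases h : i + 1 < m
            · rw [if_pos h, pvBsup_spec hm hn hi h r c hr hc _ hgs, Esub]
              exact if_neg (fun hh => hj2 ((pvBlock_iff hm).mp ⟨by have := hh.1; omega, by have := hh.1; omega⟩))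
            · rw [if_neg h]; exact Esub
          rw [Esup, pvCasc_far_none (fun h => hj0 h.symm) (fun h => hj1 h.symm) (fun h => hj2 h.symm),
            Option.getD_none]
  · -- r not in block row i: nothing written
    have hnr : ((r:Int) - m*i) ∉ PySem.List.pyRange 0 m 1 := fun hmem =>
      hri ((pvBlock_iff hm).mp (PySem.List.mem_pyRange_one.mp hmem))
    have Ediag : pvCell (maketrixB_diag m i g) r c = pvCell g r c := by
      rw [pvBdiag_spec hm hn hi r c hr hc g hg]
      exact if_neg (fun hh => hnr hh.2)
    have Esub : pvCell (if 1 ≤ i then maketrixB_sub m i (maketrixB_diag m i g) else maketrixB_diag m i g) r c =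
        pvCell g r c := by
      split_ifs with h
      · rw [pvBsub_spec hm hn hi h r c hr hc _ hgd, Ediag]
        exact if_neg (fun hh => hnr hh.2)
      · exact Ediag
    have Esup : pvCell (if i + 1 < m then
        maketrixB_sup m i (if 1 ≤ i then maketrixB_sub m i (maketrixB_diag m i g) else maketrixB_diag m i g)
        else (if 1 ≤ i then maketrixB_sub m i (maketrixB_diag m i g) else maketrixB_diag m i g)) r c =
        pvCell g r c := by
      by_cases h : i + 1 < m
      · rw [if_pos h, pvBsup_spec hm hn hi h r c hr hc _ hgs, Esub]
        exact if_neg (fun hh => hnr hh.2)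
      · rw [if_neg h]; exact Esub
    rw [Esup, if_neg hri]

-- both per-block-row bodies coincide as grids
theorem pvBodies_eq {n : Nat} {m : Int} (hm : 0 < m) (hn : (n:Int) = m*m) :
    ∀ i ∈ PySem.List.pyRange 0 m 1, ∀ g, pvDims n g →
      maketrixA_j m i g =
        (if i + 1 < m then
          maketrixB_sup m i (if 1 ≤ i then maketrixB_sub m i (maketrixB_diag m i g) else maketrixB_diag m i g)
        else (if 1 ≤ i then maketrixB_sub m i (maketrixB_diag m i g) else maketrixB_diag m i g)) := by
  intro i hi g hg
  have hib := PySem.List.mem_pyRange_one.mp hi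
  have hgd : pvDims n (maketrixB_diag m i g) := pvBdiag_dims hm hn hib g hg
  have hgs : pvDims n (if 1 ≤ i then maketrixB_sub m i (maketrixB_diag m i g) else maketrixB_diag m i g) := by
    split_ifs
    · exact pvBsub_dims hm hn hib _ hgd
    · exact hgd
  have hgB : pvDims n (if i + 1 < m then
      maketrixB_sup m i (if 1 ≤ i then maketrixB_sub m i (maketrixB_diag m i g) else maketrixB_diag m i g)
      else (if 1 ≤ i then maketrixB_sub m i (maketrixB_diag m i g) else maketrixB_diag m i g)) := by
    by_cases h : i + 1 < m
    · rw [if_pos h]; exact pvBsup_dims hm hn hib _ hgs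
    · rw [if_neg h]; exact hgs
  refine pvGrid_ext (pvAj_dims hm hn hib g hg) hgB ?_
  intro r c hr hc
  rw [pvAj_spec hm hn hib r c hr hc g hg, pvBodyB_spec hm hn hib r c hr hc g hg]

-- a fold of pointwise-equal, dimension-preserving bodies
theorem pvFoldl_congr {n : Nat} (bodyA bodyB : List (List String) → Int → List (List String))
    (L : List Int)
    (hdA : ∀ g t, t ∈ L → pvDims n g → pvDims n (bodyA g t))
    (heq : ∀ g t, t ∈ L → pvDims n g → bodyA g t = bodyB g t) :
    ∀ g, pvDims n g → L.foldl bodyA g = L.foldl bodyB g := by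
  revert hdA heq
  induction L with
  | nil => intro _ _ _ _; rfl
  | cons t L ih =>
    intro hdA heq g hg
    rw [List.foldl_cons, List.foldl_cons, ← heq g t (List.mem_cons_self ..) hg]
    exact ih (fun g t' ht' => hdA g t' (List.mem_cons_of_mem _ ht'))
      (fun g t' ht' => heq g t' (List.mem_cons_of_mem _ ht'))
      (bodyA g t) (hdA g t (List.mem_cons_self ..) hg)

-- ===== VERDICT (by name: the statement is the Claim_ definition above) =====
theorem maketrix_test_spec : Claim_equal_maketrix_test := by
  intro params maxi _
  unfold Spec_maketrix_test maketrix_test maketrix_test_alt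
  dsimp only
  by_cases hm : 0 < maxi
  · have hn : (((maxi*maxi).toNat : Nat) : Int) = maxi*maxi := Int.toNat_of_nonneg (by positivity)
    have hinit : pvDims (maxi*maxi).toNat ((PySem.List.pyRange 0 (maxi*maxi) 1).map
        (fun _ => (PySem.List.pyRange 0 (maxi*maxi) 1).map (fun _ => " 0"))) := by
      constructor
      · rw [List.length_map, PySem.List.length_pyRange_one]
        omega
      · intro row hrow
        rw [List.mem_map] at hrow
        obtain ⟨_, _, rfl⟩ := hrow
        rw [List.length_map, PySem.List.length_pyRange_one]
        omega
    exact pvFoldl_congr _ _ _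
      (fun g i hi hg => pvAj_dims hm hn (PySem.List.mem_pyRange_one.mp hi) g hg)
      (fun g t ht hg => pvBodies_eq hm hn t ht g hg) _ hinit
  · rw [PySem.List.pyRange_one_eq_nil (by omega : maxi ≤ 0)]
    rfl
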